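-- pv_equiv track=rewrite | github.com/yizhitutuqiu/cigar-refressor | cifar_regressor/vis/plot_ablation.py | _select_train_loss_tag
-- ===== SOURCE A (Python) =====
-- from typing import Dict, List
-- from typing import Optional, Tuple
--
-- def _select_train_loss_tag(tags: List[str]) -> Optional[str]:
--     """
--     Choose a 'train loss' scalar tag from a list of scalar tags robustly.
--     Preference order:
--       - exact matches: 'train/loss', 'train_loss'
--       - contains both 'train' and 'loss' (case-insensitive)
--       - endswith 'loss' while containing 'train'
--     """
--     lower = {t.lower(): t for t in tags}
--     for pref in ["train/loss", "train_loss", "loss/train"]: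
--         if pref in lower:
--             return lower[pref]
--     # contains both
--     for t in tags:
--         tl = t.lower()
--         if "train" in tl and "loss" in tl:
--             return t
--     # endswith 'loss' and has 'train'
--     for t in tags:
--         tl = t.lower()
--         if tl.endswith("loss") and "train" in tl:
--             return t
--     return None
-- ===== SOURCE B (Python) =====
-- from typing import List, Optional
--
-- _EXACT = {"train/loss": 0, "train_loss": 1, "loss/train": 2}
--
-- def _rank(tag: str) -> int:
--     tl = tag.lower()
--     r = _EXACT.get(tl)
--     if r is not None:
--         return r
--     if "train" in tl and "loss" in tl:
--         return 3
--     return 4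
--
-- def _select_train_loss_tag(tags: List[str]) -> Optional[str]:
--     best = min(tags, key=_rank, default=None)
--     if best is None or _rank(best) == 4:
--         return None
--     return best
-- ===== Notes on version B (the rewrite author's own statement) =====
-- stated objective: simpler
-- what changed: Replaces the dict build plus three sequential scans by a single min-by-rank selection over the tags (rank 0-2 exact match, 3 contains both, 4 no match; Python min keeps the first minimum), avoiding the dict allocation and repeated passes; Pre_ excludes lists where two distinct tags share the same lowercase equal to one of the three exact preference strings, on which A's dict last-write choice is accidental.
-- outside the precondition, e.g. on _select_train_loss_tag(['Train/Loss', 'train/loss']): A returns 'train/loss', B returns 'Train/Loss'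
import Mathlib
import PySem

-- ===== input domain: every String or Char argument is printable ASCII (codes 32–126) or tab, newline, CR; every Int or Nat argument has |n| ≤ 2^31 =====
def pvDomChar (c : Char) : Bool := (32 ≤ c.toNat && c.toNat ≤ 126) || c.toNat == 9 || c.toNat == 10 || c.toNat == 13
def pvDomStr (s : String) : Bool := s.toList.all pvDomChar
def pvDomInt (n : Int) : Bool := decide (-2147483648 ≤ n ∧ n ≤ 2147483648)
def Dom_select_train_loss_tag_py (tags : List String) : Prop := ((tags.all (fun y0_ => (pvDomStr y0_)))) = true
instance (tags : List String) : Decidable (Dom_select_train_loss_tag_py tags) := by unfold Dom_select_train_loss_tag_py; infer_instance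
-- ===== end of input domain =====

-- B replaces A's dict build plus three sequential scans by one min-by-rank selection (simpler decomposition, same O(n) cost).

-- ===== PORT A =====
def aBuildLower (tags : List String) : PySem.Dict String String :=
  tags.foldl (fun d t => d.insert (PySem.Str.lower t) t) PySem.Dict.empty

def aPrefLoop (lower : PySem.Dict String String) : List String → Option String
  | [] => none
  | p :: ps => if lower.contains p then lower.get? p else aPrefLoop lower ps

def aContainsBoth (t : String) : Bool :=
  PySem.Str.isIn "train" (PySem.Str.lower t) && PySem.Str.isIn "loss" (PySem.Str.lower t)

def aEndsLoss (t : String) : Bool :=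
  PySem.Str.endswith (PySem.Str.lower t) "loss" && PySem.Str.isIn "train" (PySem.Str.lower t)

def select_train_loss_tag_py (tags : List String) : Option String :=
  match aPrefLoop (aBuildLower tags) ["train/loss", "train_loss", "loss/train"] with
  | some t => some t
  | none =>
    match tags.find? aContainsBoth with
    | some t => some t
    | none => tags.find? aEndsLoss

-- ===== PORT B =====
def bExact : PySem.Dict String Nat :=
  ((PySem.Dict.empty.insert "train/loss" 0).insert "train_loss" 1).insert "loss/train" 2

def bRank (t : String) : Nat :=
  match bExact.get? (PySem.Str.lower t) with
  | some r => r
  | none =>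
    if PySem.Str.isIn "train" (PySem.Str.lower t) && PySem.Str.isIn "loss" (PySem.Str.lower t)
    then 3 else 4

def select_train_loss_tag_py_alt (tags : List String) : Option String :=
  match PySem.List.min? tags bRank with
  | none => none
  | some best => if bRank best == 4 then none else some best

-- ===== PRECONDITION & SPEC =====
-- Pre_ excludes lists in which two DISTINCT tags share the same lowercase equal to one of the three
-- exact preference strings: there A's dict-last-write pick of which spelling to return is accidental
-- (B naturally returns the first such tag, A the last).
def Pre_select_train_loss_tag_py (tags : List String) : Prop :=
  ∀ p ∈ (["train/loss", "train_loss", "loss/train"] : List String),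
    (tags.filter (fun t => PySem.Str.lower t == p)).Pairwise (· = ·)
instance (tags : List String) : Decidable (Pre_select_train_loss_tag_py tags) := by
  unfold Pre_select_train_loss_tag_py; infer_instance

def pvWitness_select_train_loss_tag_py : List String := ["accuracy", "train/loss"]

def Spec_select_train_loss_tag_py (tags : List String) (out : Option String) : Prop := out = select_train_loss_tag_py_alt tags
instance (tags : List String) (out : Option String) : Decidable (Spec_select_train_loss_tag_py tags out) := by unfold Spec_select_train_loss_tag_py; infer_instance

-- ===== CLAIM (what is proved, stated in full; the proofs are below) =====
def Claim_equal_select_train_loss_tag_py : Prop := ∀ (tags : List String), Dom_select_train_loss_tag_py tags → Pre_select_train_loss_tag_py tags → Spec_select_train_loss_tag_py tags (select_train_loss_tag_py tags)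

-- ===== LEMMAS AND PROOFS =====

-- first / last tag of l whose lowercase equals k
def firstE (k : String) (l : List String) : Option String :=
  l.find? (fun t => PySem.Str.lower t == k)

def lastE (k : String) (l : List String) : Option String :=
  l.reverse.find? (fun t => PySem.Str.lower t == k)

-- first tag of rank 3 / rank 4
def firstC (l : List String) : Option String :=
  l.find? (fun t => bRank t == 3)

def first4 (l : List String) : Option String :=
  l.find? (fun t => bRank t == 4)

-- the value A computes (exact slots: LAST occurrence, via the dict)
def selSpec (l : List String) : Option String :=
  (lastE "train/loss" l).or ((lastE "train_loss" l).or ((lastE "loss/train" l).or (firstC l)))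

-- the element Python min picks for B (first element of minimal rank)
def selB (l : List String) : Option String :=
  (firstE "train/loss" l).or ((firstE "train_loss" l).or ((firstE "loss/train" l).or
    ((firstC l).or (first4 l))))

theorem bRank_eq (t : String) :
    bRank t =
      if PySem.Str.lower t == "train/loss" then 0
      else if PySem.Str.lower t == "train_loss" then 1
      else if PySem.Str.lower t == "loss/train" then 2
      else if aContainsBoth t then 3 else 4 := by
  unfold bRank bExact aContainsBoth
  by_cases h2 : PySem.Str.lower t = "loss/train"
  · rw [h2]; decide
  · rw [PySem.Dict.get?_insert_of_ne _ _ h2]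
    by_cases h1 : PySem.Str.lower t = "train_loss"
    · rw [h1]; decide
    · rw [PySem.Dict.get?_insert_of_ne _ _ h1]
      by_cases h0 : PySem.Str.lower t = "train/loss"
      · rw [h0]; decide
      · rw [PySem.Dict.get?_insert_of_ne _ _ h0]
        simp only [beq_eq_false_iff_ne.mpr h0, beq_eq_false_iff_ne.mpr h1,
          beq_eq_false_iff_ne.mpr h2, Bool.false_eq_true, if_false]
        rfl

theorem find?_congr_mem {α : Type} {p q : α → Bool} (l : List α)
    (h : ∀ x ∈ l, p x = q x) : l.find? p = l.find? q := by
  induction l with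
  | nil => rfl
  | cons a l ih =>
    simp only [List.find?_cons, h a (by simp)]
    cases q a <;> simp_all

theorem dict_get_foldl (l : List String) (d : PySem.Dict String String) (k : String) :
    (l.foldl (fun d t => d.insert (PySem.Str.lower t) t) d).get? k
      = (lastE k l).or (d.get? k) := by
  induction l generalizing d with
  | nil => simp [lastE]
  | cons t ts ih =>
    simp only [List.foldl_cons, ih, lastE, List.reverse_cons, List.find?_append]
    by_cases h : PySem.Str.lower t = k
    · subst h
      simp [PySem.Dict.get?_insert_self]
    · rw [PySem.Dict.get?_insert_of_ne d t (Ne.symm h)]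
      simp [beq_eq_false_iff_ne.mpr h]

theorem endsLoss_imp (t : String) (h : aEndsLoss t = true) : aContainsBoth t = true := by
  unfold aEndsLoss at h
  unfold aContainsBoth
  simp only [Bool.and_eq_true] at h ⊢
  refine ⟨h.2, ?_⟩
  rw [PySem.Str.isIn_iff_infix]
  exact ((PySem.Chars.endswith_iff _ _).mp (by simpa using h.1)).isInfix

theorem get?_lower (l : List String) (k : String) :
    (aBuildLower l).get? k = lastE k l := by
  unfold aBuildLower
  rw [dict_get_foldl, show (PySem.Dict.empty : PySem.Dict String String).get? k = none from rfl,
    Option.or_none]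

theorem contains_lower (l : List String) (k : String) :
    (aBuildLower l).contains k = (lastE k l).isSome := by
  rw [← get?_lower l k]
  rcases hc : (aBuildLower l).contains k with _ | _
  · rw [(PySem.Dict.get?_eq_none_iff_contains _ _).mpr hc]; rfl
  · rcases hg : (aBuildLower l).get? k with _ | t
    · have h2 := (PySem.Dict.get?_eq_none_iff_contains _ _).mp hg
      rw [hc] at h2; simp at h2
    · rfl

theorem a_eq_selSpec (l : List String) : select_train_loss_tag_py l = selSpec l := by
  unfold select_train_loss_tag_py selSpec
  simp only [aPrefLoop, contains_lower, get?_lower]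
  rcases h0 : lastE "train/loss" l with _ | t0 <;>
    rcases h1 : lastE "train_loss" l with _ | t1 <;>
      rcases h2 : lastE "loss/train" l with _ | t2
  case none.none.none =>
    have hnone0 : ∀ x ∈ l, (PySem.Str.lower x == "train/loss") = false := by
      intro x hx
      have hm := List.find?_eq_none.mp
        (show l.reverse.find? (fun t => PySem.Str.lower t == "train/loss") = none from h0) x
        (List.mem_reverse.mpr hx)
      simpa using hm
    have hnone1 : ∀ x ∈ l, (PySem.Str.lower x == "train_loss") = false := by
      intro x hx
      have hm := List.find?_eq_none.mp
        (show l.reverse.find? (fun t => PySem.Str.lower t == "train_loss") = none from h1) x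
        (List.mem_reverse.mpr hx)
      simpa using hm
    have hnone2 : ∀ x ∈ l, (PySem.Str.lower x == "loss/train") = false := by
      intro x hx
      have hm := List.find?_eq_none.mp
        (show l.reverse.find? (fun t => PySem.Str.lower t == "loss/train") = none from h2) x
        (List.mem_reverse.mpr hx)
      simpa using hm
    have hC : l.find? aContainsBoth = firstC l := by
      apply find?_congr_mem
      intro x hx
      simp only [bRank_eq x, hnone0 x hx, hnone1 x hx, hnone2 x hx, Bool.false_eq_true, if_false]
      cases hcb : aContainsBoth x <;> simp
    simp only [Option.isSome_none, Bool.false_eq_true, if_false, Option.none_or]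
    rw [hC]
    rcases hc3 : firstC l with _ | c
    · have hno := List.find?_eq_none.mp (by rw [hC, hc3] : l.find? aContainsBoth = none)
      rw [List.find?_eq_none.mpr (fun x hx hE => hno x hx (endsLoss_imp x hE))]
    · simp
  all_goals simp

-- ranks of the elements the finds return
theorem rank_firstE0 (l : List String) (m : String) (h : firstE "train/loss" l = some m) :
    bRank m = 0 := by
  have := List.find?_some h
  rw [bRank_eq]; simp_all
theorem rank_firstE1 (l : List String) (m : String) (h : firstE "train_loss" l = some m) :
    bRank m = 1 := by
  have := List.find?_some h
  rw [bRank_eq]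
  have he := eq_of_beq this
  rw [he, if_neg (by decide), if_pos (by decide)]
theorem rank_firstE2 (l : List String) (m : String) (h : firstE "loss/train" l = some m) :
    bRank m = 2 := by
  have := List.find?_some h
  rw [bRank_eq]
  have he := eq_of_beq this
  rw [he, if_neg (by decide), if_neg (by decide), if_pos (by decide)]
theorem rank_firstC (l : List String) (m : String) (h : firstC l = some m) :
    bRank m = 3 := by
  have := List.find?_some h
  simpa using this
theorem rank_first4 (l : List String) (m : String) (h : first4 l = some m) :
    bRank m = 4 := by
  have := List.find?_some h
  simpa using this

theorem min?_append (l : List String) (t : String) :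
    PySem.List.min? (l ++ [t]) bRank =
      match PySem.List.min? l bRank with
      | none => some t
      | some m => if bRank t < bRank m then some t else some m := by
  unfold PySem.List.min?
  rw [List.foldl_append, List.foldl_cons, List.foldl_nil]
  generalize List.foldl _ none l = acc
  cases acc <;> rfl

theorem firstE_append (k t : String) (l : List String) :
    firstE k (l ++ [t]) = (firstE k l).or (if PySem.Str.lower t == k then some t else none) := by
  simp only [firstE, List.find?_append, List.find?_cons, List.find?_nil]
  cases h : (PySem.Str.lower t == k) <;> simp

theorem firstC_append (t : String) (l : List String) :
    firstC (l ++ [t]) = (firstC l).or (if bRank t == 3 then some t else none) := by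
  simp only [firstC, List.find?_append, List.find?_cons, List.find?_nil]
  cases h : (bRank t == 3) <;> simp

theorem first4_append (t : String) (l : List String) :
    first4 (l ++ [t]) = (first4 l).or (if bRank t == 4 then some t else none) := by
  simp only [first4, List.find?_append, List.find?_cons, List.find?_nil]
  cases h : (bRank t == 4) <;> simp

theorem min?_eq_selB (l : List String) : PySem.List.min? l bRank = selB l := by
  induction l using List.reverseRecOn with
  | nil => rfl
  | append_singleton l t ih =>
    rw [min?_append, ih]
    unfold selB
    simp only [firstE_append, firstC_append, first4_append]
    have hrt := bRank_eq t
    rcases h0 : (PySem.Str.lower t == "train/loss") with _ | _ <;>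
      rcases h1 : (PySem.Str.lower t == "train_loss") with _ | _ <;>
        rcases h2 : (PySem.Str.lower t == "loss/train") with _ | _ <;>
          rcases h3 : aContainsBoth t with _ | _ <;>
            simp only [h0, h1, h2, h3, if_true, if_false, Bool.false_eq_true] at hrt <;>
    · rcases e0 : firstE "train/loss" l with _ | x0 <;>
        rcases e1 : firstE "train_loss" l with _ | x1 <;>
          rcases e2 : firstE "loss/train" l with _ | x2 <;>
            rcases e3 : firstC l with _ | x3 <;>
              rcases e4 : first4 l with _ | x4 <;>
        (try have hr0 := rank_firstE0 _ _ e0) <;>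
        (try have hr1 := rank_firstE1 _ _ e1) <;>
        (try have hr2 := rank_firstE2 _ _ e2) <;>
        (try have hr3 := rank_firstC _ _ e3) <;>
        (try have hr4 := rank_first4 _ _ e4) <;>
      simp [selB, hrt, e0, e1, e2, e3, e4, *]

theorem pairwise_head?_eq_getLast? {l : List String} (h : l.Pairwise (· = ·)) :
    l.head? = l.getLast? := by
  induction l with
  | nil => rfl
  | cons a t ih =>
    rcases t with _ | ⟨b, t'⟩
    · rfl
    · have hab : ∀ x ∈ b :: t', a = x := (List.pairwise_cons.mp h).1
      have := hab ((b :: t').getLast (by simp)) (List.getLast_mem _)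
      simp [List.getLast?_eq_getLast, this]

theorem lastE_eq_firstE_of_pairwise (k : String) (l : List String)
    (h : (l.filter (fun t => PySem.Str.lower t == k)).Pairwise (· = ·)) :
    lastE k l = firstE k l := by
  unfold lastE firstE
  rw [← List.head?_filter, ← List.head?_filter, List.filter_reverse, List.head?_reverse]
  exact (pairwise_head?_eq_getLast? h).symm

-- ===== VERDICT (by name: the statement is the Claim_ definition above) =====
theorem select_train_loss_tag_py_spec : Claim_equal_select_train_loss_tag_py := by
  intro tags _ hpre
  unfold Spec_select_train_loss_tag_py select_train_loss_tag_py_alt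
  rw [min?_eq_selB, a_eq_selSpec]
  unfold selSpec selB
  rw [lastE_eq_firstE_of_pairwise _ _ (hpre "train/loss" (by simp)),
    lastE_eq_firstE_of_pairwise _ _ (hpre "train_loss" (by simp)),
    lastE_eq_firstE_of_pairwise _ _ (hpre "loss/train" (by simp))]
  rcases e0 : firstE "train/loss" tags with _ | x0 <;>
    rcases e1 : firstE "train_loss" tags with _ | x1 <;>
      rcases e2 : firstE "loss/train" tags with _ | x2 <;>
        rcases e3 : firstC tags with _ | x3 <;>
          rcases e4 : first4 tags with _ | x4 <;>
      (try have hr0 := rank_firstE0 _ _ e0) <;>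
      (try have hr1 := rank_firstE1 _ _ e1) <;>
      (try have hr2 := rank_firstE2 _ _ e2) <;>
      (try have hr3 := rank_firstC _ _ e3) <;>
      (try have hr4 := rank_first4 _ _ e4) <;>
    simp [e0, e1, e2, e3, e4, *]
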